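-- pv_equiv track=rewrite | github.com/tokenpak/tokenpak | tokenpak/agent/compression/fidelity_tiers.py | _extract_changed
-- ===== SOURCE A (Python) =====
-- from typing import Dict, List, Optional
--
-- def _extract_changed(source: str, changed_lines: List[int]) -> str:
--     """Return lines within ±3 context lines of any changed line."""
--     lines = source.splitlines()
--     total = len(lines)
--     context = 3
--     keep: set[int] = set()
--
--     for ln in changed_lines:
--         idx = ln - 1  # 0-indexed
--         for i in range(max(0, idx - context), min(total, idx + context + 1)):
--             keep.add(i)
--
--     result_lines = [lines[i] for i in sorted(keep)]
--     return "\n".join(result_lines).strip()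
-- ===== SOURCE B (Python) =====
-- from typing import List
--
-- def _extract_changed(source: str, changed_lines: List[int]) -> str:
--     """Return lines within +-3 context lines of any changed line.
--
--     Single filtering pass over the lines themselves: keep a line when its
--     1-based number is within 3 of some changed line; no index set, no sort.
--     """
--     lines = source.splitlines()
--     kept = [line for i, line in enumerate(lines)
--             if any(abs(i + 1 - ln) <= 3 for ln in changed_lines)]
--     return "\n".join(kept).strip()
-- ===== Notes on version B (the rewrite author's own statement) =====
-- stated objective: simpler
-- what changed: Instead of marking every in-context index in a set and sorting it, B makes one filtering pass over the lines, keeping a line iff its 1-based number is within 3 of some changed line; no index set, no sort.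
import Mathlib
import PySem

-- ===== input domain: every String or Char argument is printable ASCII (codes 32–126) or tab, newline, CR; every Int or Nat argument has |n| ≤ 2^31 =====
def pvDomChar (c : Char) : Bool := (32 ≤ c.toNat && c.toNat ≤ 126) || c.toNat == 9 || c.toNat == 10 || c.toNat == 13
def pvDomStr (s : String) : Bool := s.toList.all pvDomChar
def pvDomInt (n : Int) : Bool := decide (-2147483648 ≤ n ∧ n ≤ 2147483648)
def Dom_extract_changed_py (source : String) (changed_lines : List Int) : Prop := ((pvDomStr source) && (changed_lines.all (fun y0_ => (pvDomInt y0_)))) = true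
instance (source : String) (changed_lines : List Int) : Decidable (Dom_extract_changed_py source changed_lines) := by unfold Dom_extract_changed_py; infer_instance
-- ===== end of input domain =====

-- B replaces A's mark-indices-in-a-set-then-sort pass by a single filter over the
-- enumerated lines (keep a line iff its 1-based number is within 3 of some changed
-- line); objective: simpler.

-- ===== PORT A =====
def extract_changed_py (source : String) (changed_lines : List Int) : String :=
  let lines := PySem.Str.splitlines source
  let total : Int := PySem.List.len lines
  let context : Int := 3
  let keep : PySem.Set Int :=
    changed_lines.foldl (fun keep ln =>
      let idx := ln - 1
      (PySem.List.pyRange (max 0 (idx - context)) (min total (idx + context + 1))).foldl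
        (fun k i => PySem.Set.add k i) keep) PySem.Set.empty
  let result_lines := (PySem.List.sorted keep (fun x => x)).map (fun i => PySem.List.pyGetD lines i "")
  PySem.Str.strip (PySem.Str.join "\n" result_lines)

-- ===== PORT B =====
def extract_changed_py_alt (source : String) (changed_lines : List Int) : String :=
  let lines := PySem.Str.splitlines source
  let kept := ((PySem.List.enumerate lines).filter
      (fun p => changed_lines.any (fun ln => decide (|p.1 + 1 - ln| ≤ 3)))).map (·.2)
  PySem.Str.strip (PySem.Str.join "\n" kept)

-- ===== PRECONDITION & SPEC =====
def Spec_extract_changed_py (source : String) (changed_lines : List Int) (out : String) : Prop := out = extract_changed_py_alt source changed_lines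
instance (source : String) (changed_lines : List Int) (out : String) : Decidable (Spec_extract_changed_py source changed_lines out) := by unfold Spec_extract_changed_py; infer_instance

-- ===== CLAIM (what is proved, stated in full; the proofs are below) =====
def Claim_equal_extract_changed_py : Prop := ∀ (source : String) (changed_lines : List Int), Dom_extract_changed_py source changed_lines → Spec_extract_changed_py source changed_lines (extract_changed_py source changed_lines)

-- ===== LEMMAS AND PROOFS =====

-- A's inner range-fold is Set.update.
theorem keep_foldl_update (cl : List Int) (total : Int) (s : PySem.Set Int) :
    cl.foldl (fun keep ln =>
      (PySem.List.pyRange (max 0 (ln - 1 - 3)) (min total (ln - 1 + 3 + 1))).foldl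
        (fun k i => PySem.Set.add k i) keep) s
    = cl.foldl (fun keep ln =>
      PySem.Set.update keep (PySem.List.pyRange (max 0 (ln - 1 - 3)) (min total (ln - 1 + 3 + 1)))) s := rfl

theorem mem_keep (cl : List Int) (total : Int) (s : PySem.Set Int) (x : Int) :
    (x ∈ cl.foldl (fun keep ln =>
      PySem.Set.update keep (PySem.List.pyRange (max 0 (ln - 1 - 3)) (min total (ln - 1 + 3 + 1)))) s)
    ↔ x ∈ s ∨ ∃ ln ∈ cl, max 0 (ln - 1 - 3) ≤ x ∧ x < min total (ln - 1 + 3 + 1) := by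
  induction cl generalizing s with
  | nil => simp
  | cons a t ih =>
    simp only [List.foldl_cons, ih, PySem.Set.mem_update, PySem.List.mem_pyRange_one,
      List.mem_cons]
    constructor
    · rintro ((h | h) | ⟨ln, hln, h⟩)
      · exact Or.inl h
      · exact Or.inr ⟨a, Or.inl rfl, h⟩
      · exact Or.inr ⟨ln, Or.inr hln, h⟩
    · rintro (h | ⟨ln, (rfl | hln), h⟩)
      · exact Or.inl (Or.inl h)
      · exact Or.inl (Or.inr h)
      · exact Or.inr ⟨ln, hln, h⟩

theorem nodup_keep (cl : List Int) (total : Int) (s : PySem.Set Int) (hs : s.Nodup) :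
    (cl.foldl (fun keep ln =>
      PySem.Set.update keep (PySem.List.pyRange (max 0 (ln - 1 - 3)) (min total (ln - 1 + 3 + 1)))) s).Nodup := by
  induction cl generalizing s with
  | nil => exact hs
  | cons a t ih => exact ih _ (PySem.Set.nodup_update _ _ hs)

theorem kept_lines_eq (lines : List String) (changed_lines : List Int) :
    List.map (fun i => PySem.List.pyGetD lines i "")
      (PySem.List.sorted
        (changed_lines.foldl (fun keep ln =>
          List.foldl (fun k i => PySem.Set.add k i) keep
            (PySem.List.pyRange (max 0 (ln - 1 - 3)) (min (PySem.List.len lines) (ln - 1 + 3 + 1))))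
          PySem.Set.empty)
        (fun x => x))
    = List.map (fun x => x.2)
        (List.filter (fun p => changed_lines.any fun ln => decide (|p.1 + 1 - ln| ≤ 3))
          (PySem.List.enumerate lines)) := by
  set total : Int := PySem.List.len lines with htotal
  set ys : List Int := (PySem.List.pyRange 0 total).filter
      (fun i => changed_lines.any (fun ln => decide (|i + 1 - ln| ≤ 3))) with hys
  have hys_pw : ys.Pairwise (· < ·) := (PySem.List.pairwise_lt_pyRange_one 0 total).filter _
  set keep := changed_lines.foldl (fun keep ln =>
      PySem.Set.update keep (PySem.List.pyRange (max 0 (ln - 1 - 3)) (min total (ln - 1 + 3 + 1))))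
      (PySem.Set.empty) with hkeep
  have hmem : ∀ x, x ∈ ys ↔ x ∈ keep := by
    intro x
    rw [hkeep, mem_keep, hys]
    simp only [List.mem_filter, PySem.List.mem_pyRange_one, PySem.Set.empty,
      List.not_mem_nil, false_or, List.any_eq_true, decide_eq_true_eq, abs_le]
    constructor
    · rintro ⟨⟨h0, hx⟩, ln, hln, h1, h2⟩
      exact ⟨ln, hln, by omega, by omega⟩
    · rintro ⟨ln, hln, h1, h2⟩
      refine ⟨⟨by omega, by omega⟩, ln, hln, by omega, by omega⟩
  have hnd : keep.Nodup := by rw [hkeep]; exact nodup_keep _ _ _ List.nodup_nil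
  have hperm : ys.Perm keep := (List.perm_ext_iff_of_nodup hys_pw.nodup hnd).mpr hmem
  have hsorted : PySem.List.sorted keep (fun x => x) = ys :=
    PySem.List.sorted_eq_of_perm_of_pairwise_lt keep ys (fun x => x) hperm hys_pw
  rw [keep_foldl_update, ← hkeep, hsorted]
  rw [PySem.List.enumerate_eq_map_pyRange lines "", ← htotal, List.filter_map, List.map_map]
  rfl

-- ===== VERDICT (by name: the statement is the Claim_ definition above) =====
theorem extract_changed_py_spec : Claim_equal_extract_changed_py := by
  intro source changed_lines _
  unfold Spec_extract_changed_py extract_changed_py extract_changed_py_alt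
  exact congrArg PySem.Str.strip
    (congrArg (PySem.Str.join "\n") (kept_lines_eq (PySem.Str.splitlines source) changed_lines))
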